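-- pv_equiv track=rewrite | github.com/Quikks1lver/advent-of-code | day17.py | countActiveCubesAfterXCycles
-- ===== SOURCE A (Python) =====
-- from typing import List, Set, Tuple
--
-- def countActiveCubesAfterXCycles(activeSet: Set[Tuple[int, int, int]], cycles: int) -> int:
--    """
--    Runs X cycles of the process according to the below rules, and outputs num active cubes:
--    - If a cube is active and exactly 2 or 3 of its neighbors are also active, the cube remains active.
--      Otherwise, the cube becomes inactive.
--    - If a cube is inactive but exactly 3 of its neighbors are active, the cube becomes active. Otherwise,
--      the cube remains inactive.
--    """
--    for _ in range(cycles):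
--       newSet: Set[Tuple[int, int, int]] = activeSet.copy()
--       cubesToCheck: Set[Tuple[int, int, int]] = set()
--
--       for (x, y, z) in activeSet:
--          cubesToCheck.add( (x, y, z) )
--
--          for dx in range(-1, 2, 1):
--             for dy in range(-1, 2, 1):
--                for dz in range(-1, 2, 1):
--                   cubesToCheck.add( (x + dx, y + dy, z + dz) )
--
--       for (x, y, z) in cubesToCheck:
--          numActiveCubes: int = 0
--
--          for dx in range(-1, 2, 1):
--             for dy in range(-1, 2, 1):
--                for dz in range(-1, 2, 1):
--                   if dx != 0 or dy != 0 or dz != 0: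
--                      newX, newY, newZ = x + dx, y + dy, z + dz
--
--                      if (newX, newY, newZ) in activeSet:
--                         numActiveCubes += 1
--
--          if (x, y, z) in activeSet and numActiveCubes in {2, 3}:
--             newSet.add( (x, y, z) )
--
--          if (x, y, z) in activeSet and numActiveCubes not in {2, 3}:
--             newSet.remove( (x, y, z) )
--
--          if (x, y, z) not in activeSet and numActiveCubes == 3:
--             newSet.add( (x, y, z) )
--
--       activeSet = newSet
--
--    return len(activeSet)
-- ===== SOURCE B (Python) =====
-- def countActiveCubesAfterXCycles(activeSet, cycles):
--    """
--    Counter-scatter reimplementation: one pass scatters +1 into a neighbor-count dict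
--    for the 26 neighbors of every active cube, then one pass over the dict decides the
--    next generation: a cell is active next iff its count is 3, or its count is 2 and
--    it is currently active (active cells absent from the dict have count 0 and die).
--    """
--    offsets = [(dx, dy, dz)
--               for dx in (-1, 0, 1) for dy in (-1, 0, 1) for dz in (-1, 0, 1)
--               if (dx, dy, dz) != (0, 0, 0)]
--    active = activeSet
--    for _ in range(cycles):
--       counts = {}
--       for (x, y, z) in active:
--          for (dx, dy, dz) in offsets:
--             k = (x + dx, y + dy, z + dz)
--             counts[k] = counts.get(k, 0) + 1
--       active = {c for c, n in counts.items() if n == 3 or (n == 2 and c in active)}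
--    return len(active)
-- ===== Notes on version B (the rewrite author's own statement) =====
-- stated objective: alternative
-- what changed: Instead of collecting a candidate set and re-counting the 26 neighbors of every candidate (gather), B makes one scatter pass incrementing a neighbor-count dict entry for each of the 26 neighbors of each active cube, then decides each dict key in O(1) from its count; cells absent from the dict correctly die.
import Mathlib
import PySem

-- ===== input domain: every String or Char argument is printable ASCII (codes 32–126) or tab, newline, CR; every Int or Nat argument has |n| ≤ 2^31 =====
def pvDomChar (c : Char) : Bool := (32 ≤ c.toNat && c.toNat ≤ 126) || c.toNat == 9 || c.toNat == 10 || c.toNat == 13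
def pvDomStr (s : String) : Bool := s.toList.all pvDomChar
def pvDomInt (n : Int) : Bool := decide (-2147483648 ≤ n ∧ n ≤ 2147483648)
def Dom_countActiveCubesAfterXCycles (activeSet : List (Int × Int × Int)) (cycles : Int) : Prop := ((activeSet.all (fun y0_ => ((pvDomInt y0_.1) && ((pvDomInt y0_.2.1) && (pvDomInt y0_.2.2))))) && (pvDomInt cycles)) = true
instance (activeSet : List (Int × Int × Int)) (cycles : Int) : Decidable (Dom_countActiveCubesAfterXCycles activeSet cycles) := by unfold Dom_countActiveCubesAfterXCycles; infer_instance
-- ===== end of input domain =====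

-- B replaces A's gather pass (re-count the 26 neighbors of every candidate cube) by one
-- scatter pass into a neighbor-count dict followed by a per-key decision (objective: alternative).


-- ===== PORT A =====
-- cubesToCheck: every active cube plus its 27-cell neighborhood
def aCheckSet (activeSet : List (Int × Int × Int)) : PySem.Set (Int × Int × Int) :=
  activeSet.foldl (fun s c =>
    let s := PySem.Set.add s c
    (PySem.List.pyRange (-1) 2 1).foldl (fun s dx =>
      (PySem.List.pyRange (-1) 2 1).foldl (fun s dy =>
        (PySem.List.pyRange (-1) 2 1).foldl (fun s dz =>
          PySem.Set.add s (c.1 + dx, c.2.1 + dy, c.2.2 + dz)) s) s) s) PySem.Set.empty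

-- numActiveCubes for one cube
def aNumActive (activeSet : List (Int × Int × Int)) (c : Int × Int × Int) : Int :=
  (PySem.List.pyRange (-1) 2 1).foldl (fun n dx =>
    (PySem.List.pyRange (-1) 2 1).foldl (fun n dy =>
      (PySem.List.pyRange (-1) 2 1).foldl (fun n dz =>
        if dx ≠ 0 ∨ dy ≠ 0 ∨ dz ≠ 0 then
          if (c.1 + dx, c.2.1 + dy, c.2.2 + dz) ∈ activeSet then n + 1 else n
        else n) n) n) 0

-- one cycle of A's loop body
def aStep (activeSet : List (Int × Int × Int)) : List (Int × Int × Int) :=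
  (aCheckSet activeSet).foldl (fun newSet c =>
    let n := aNumActive activeSet c
    let newSet := if c ∈ activeSet ∧ (n = 2 ∨ n = 3) then PySem.Set.add newSet c else newSet
    -- newSet.remove(c): here c is provably present (newSet starts as a copy of activeSet
    -- and each check cube is visited once), so remove never raises; when the element is
    -- present, remove and discard have the same effect
    let newSet := if c ∈ activeSet ∧ ¬(n = 2 ∨ n = 3) then PySem.Set.discard newSet c else newSet
    if c ∉ activeSet ∧ n = 3 then PySem.Set.add newSet c else newSet) activeSet

def countActiveCubesAfterXCycles (activeSet : List (Int × Int × Int)) (cycles : Int) : Int :=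
  ((PySem.List.pyRange 0 cycles 1).foldl (fun s _ => aStep s) activeSet).length

-- ===== PORT B =====
-- the 26 neighbor offsets (Source B's module-level list comprehension)
def pvOffsets : List (Int × Int × Int) :=
  ([(-1 : Int), 0, 1].flatMap fun dx =>
    [(-1 : Int), 0, 1].flatMap fun dy =>
      [(-1 : Int), 0, 1].map fun dz => (dx, dy, dz)).filter
    (fun o => o ≠ ((0 : Int), (0 : Int), (0 : Int)))

-- one cycle of B's loop body: scatter counts, then decide each key
def bStep (active : List (Int × Int × Int)) : List (Int × Int × Int) :=
  let counts : PySem.Dict (Int × Int × Int) Int :=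
    active.foldl (fun d c =>
      pvOffsets.foldl (fun d o => d.modify (c.1 + o.1, c.2.1 + o.2.1, c.2.2 + o.2.2) 0 (· + 1)) d)
      PySem.Dict.empty
  PySem.Set.ofList
    ((counts.items.filter (fun p => p.2 == 3 || (p.2 == 2 && active.contains p.1))).map (·.1))

def countActiveCubesAfterXCycles_alt (activeSet : List (Int × Int × Int)) (cycles : Int) : Int :=
  ((PySem.List.pyRange 0 cycles 1).foldl (fun s _ => bStep s) activeSet).length

-- ===== PRECONDITION & SPEC =====
-- activeSet models a Python set, so its element list is duplicate-free; nothing else is excluded.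
def Pre_countActiveCubesAfterXCycles (activeSet : List (Int × Int × Int)) (cycles : Int) : Prop :=
  activeSet.Nodup

instance (activeSet : List (Int × Int × Int)) (cycles : Int) : Decidable (Pre_countActiveCubesAfterXCycles activeSet cycles) := by unfold Pre_countActiveCubesAfterXCycles; infer_instance

def pvWitness_countActiveCubesAfterXCycles : (List (Int × Int × Int)) × Int :=
  ([(0, 0, 0), (0, 1, 0), (0, 2, 0)], 1)

def Spec_countActiveCubesAfterXCycles (activeSet : List (Int × Int × Int)) (cycles : Int) (out : Int) : Prop := out = countActiveCubesAfterXCycles_alt activeSet cycles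
instance (activeSet : List (Int × Int × Int)) (cycles : Int) (out : Int) : Decidable (Spec_countActiveCubesAfterXCycles activeSet cycles out) := by unfold Spec_countActiveCubesAfterXCycles; infer_instance

-- ===== CLAIM (what is proved, stated in full; the proofs are below) =====
def Claim_equal_countActiveCubesAfterXCycles : Prop := ∀ (activeSet : List (Int × Int × Int)) (cycles : Int), Dom_countActiveCubesAfterXCycles activeSet cycles → Pre_countActiveCubesAfterXCycles activeSet cycles → Spec_countActiveCubesAfterXCycles activeSet cycles (countActiveCubesAfterXCycles activeSet cycles)

-- ===== LEMMAS AND PROOFS =====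

-- vocabulary for the proofs
def addc (x o : Int × Int × Int) : Int × Int × Int := (x.1 + o.1, x.2.1 + o.2.1, x.2.2 + o.2.2)
def subc (x c : Int × Int × Int) : Int × Int × Int := (x.1 - c.1, x.2.1 - c.2.1, x.2.2 - c.2.2)
-- number of active neighbors of x (membership-based)
def Ncnt (a : List (Int × Int × Int)) (x : Int × Int × Int) : Int :=
  (pvOffsets.countP (fun o => decide (addc x o ∈ a)) : Int)
-- the automaton rule: x is active in the next generation
def Rule (a : List (Int × Int × Int)) (x : Int × Int × Int) : Prop :=
  Ncnt a x = 3 ∨ (Ncnt a x = 2 ∧ x ∈ a)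
-- the 27-offset unfiltered block (A's cubesToCheck neighborhood)
def offsets27 : List (Int × Int × Int) :=
  [(-1 : Int), 0, 1].flatMap fun dx =>
    [(-1 : Int), 0, 1].flatMap fun dy =>
      [(-1 : Int), 0, 1].map fun dz => (dx, dy, dz)
-- the 26 neighbors of a cube, as B scatters them
def nbrL (c : Int × Int × Int) : List (Int × Int × Int) := pvOffsets.map (addc c)

lemma pyRange_m1 : PySem.List.pyRange (-1) 2 1 = [-1, 0, 1] := by decide

lemma nodup_pvOffsets : pvOffsets.Nodup := by decide

lemma mem_pvOffsets (o : Int × Int × Int) :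
    o ∈ pvOffsets ↔ (-1 ≤ o.1 ∧ o.1 ≤ 1 ∧ -1 ≤ o.2.1 ∧ o.2.1 ≤ 1 ∧ -1 ≤ o.2.2 ∧ o.2.2 ≤ 1 ∧
      ¬(o.1 = 0 ∧ o.2.1 = 0 ∧ o.2.2 = 0)) := by
  obtain ⟨p, q, r⟩ := o
  simp only [pvOffsets, List.mem_filter, List.mem_flatMap, List.mem_map, List.mem_cons,
    List.not_mem_nil, or_false, Prod.mk.injEq, ne_eq, decide_not, Bool.not_eq_true',
    decide_eq_false_iff_not]
  constructor
  · rintro ⟨⟨dx, hdx, dy, hdy, dz, hdz, rfl, rfl, rfl⟩, hne⟩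
    refine ⟨by omega, by omega, by omega, by omega, by omega, by omega, fun h => hne ?_⟩
    exact ⟨h.1, h.2.1, h.2.2⟩
  · rintro ⟨h1, h2, h3, h4, h5, h6, hne⟩
    exact ⟨⟨p, by omega, q, by omega, r, by omega, rfl, rfl, rfl⟩, fun h => hne ⟨h.1, h.2.1, h.2.2⟩⟩

lemma mem_offsets27 (o : Int × Int × Int) :
    o ∈ offsets27 ↔ (-1 ≤ o.1 ∧ o.1 ≤ 1 ∧ -1 ≤ o.2.1 ∧ o.2.1 ≤ 1 ∧ -1 ≤ o.2.2 ∧ o.2.2 ≤ 1) := by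
  obtain ⟨p, q, r⟩ := o
  simp only [offsets27, List.mem_flatMap, List.mem_map, List.mem_cons, List.not_mem_nil, or_false,
    Prod.mk.injEq]
  constructor
  · rintro ⟨dx, hdx, dy, hdy, dz, hdz, rfl, rfl, rfl⟩
    refine ⟨by omega, by omega, by omega, by omega, by omega, by omega⟩
  · rintro ⟨h1, h2, h3, h4, h5, h6⟩
    exact ⟨p, by omega, q, by omega, r, by omega, rfl, rfl, rfl⟩

lemma ncnt_congr {a b : List (Int × Int × Int)} (h : ∀ y, y ∈ a ↔ y ∈ b) (x : Int × Int × Int) :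
    Ncnt a x = Ncnt b x := by
  unfold Ncnt
  congr 1
  exact List.countP_congr (fun o _ => by simp [h])

lemma rule_congr {a b : List (Int × Int × Int)} (h : ∀ y, y ∈ a ↔ y ∈ b) (x : Int × Int × Int) :
    Rule a x ↔ Rule b x := by
  unfold Rule
  rw [ncnt_congr h x, h x]

lemma ncnt_pos_witness {a : List (Int × Int × Int)} {x : Int × Int × Int} (h : 0 < Ncnt a x) :
    ∃ o ∈ pvOffsets, addc x o ∈ a := by
  unfold Ncnt at h
  have h' : 0 < pvOffsets.countP (fun o => decide (addc x o ∈ a)) := by exact_mod_cast h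
  obtain ⟨o, ho, hd⟩ := List.countP_pos_iff.1 h'
  exact ⟨o, ho, by simpa using hd⟩

lemma neg_mem_pvOffsets (x c : Int × Int × Int) : subc x c ∈ pvOffsets ↔ subc c x ∈ pvOffsets := by
  simp only [mem_pvOffsets, subc]
  omega

lemma addc_subc (x y : Int × Int × Int) : addc x (subc y x) = y := by
  simp [addc, subc]

lemma subc_addc (x : Int × Int × Int) (o : Int × Int × Int) : subc (addc x o) x = o := by
  obtain ⟨o1, o2, o3⟩ := o; simp [addc, subc]

lemma addc_inj (x : Int × Int × Int) {o o' : Int × Int × Int} (h : addc x o = addc x o') : o = o' := by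
  obtain ⟨a1, a2, a3⟩ := o; obtain ⟨b1, b2, b3⟩ := o'
  simp only [addc, Prod.mk.injEq] at h ⊢
  omega

lemma addc_eq_iff (x o y : Int × Int × Int) : addc x o = y ↔ o = subc y x := by
  obtain ⟨a1, a2, a3⟩ := o; obtain ⟨y1, y2, y3⟩ := y
  simp only [addc, subc, Prod.mk.injEq]
  omega

-- ---------- A's neighbor count equals the canonical count ----------

lemma countP_flatMap' {α β : Type} (l : List α) (f : α → List β) (p : β → Bool) :
    (l.flatMap f).countP p = (l.map fun x => (f x).countP p).sum := by
  induction l with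
  | nil => simp
  | cons h t ih => simp [List.countP_append, ih]

lemma aNumActive_eq (a : List (Int × Int × Int)) (x : Int × Int × Int) :
    aNumActive a x = Ncnt a x := by
  unfold aNumActive Ncnt
  rw [pyRange_m1]
  have hz : ∀ dx dy : Int, ∀ n : Int,
      ([-1, 0, 1] : List Int).foldl (fun n dz =>
        if dx ≠ 0 ∨ dy ≠ 0 ∨ dz ≠ 0 then
          if (x.1 + dx, x.2.1 + dy, x.2.2 + dz) ∈ a then n + 1 else n
        else n) n
      = n + (([-1, 0, 1] : List Int).countP
          (fun dz => decide (addc x (dx, dy, dz) ∈ a) && decide ((dx, dy, dz) ≠ ((0:Int),(0:Int),(0:Int)))) : Int) := by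
    intro dx dy n
    rw [PySem.List.foldl_congr_mem' (g := fun n dz =>
      if (addc x (dx, dy, dz) ∈ a ∧ (dx, dy, dz) ≠ ((0:Int),(0:Int),(0:Int))) then n + 1 else n)]
    · rw [PySem.List.foldl_ite_add_one]
      congr 1
      congr 1
      apply List.countP_congr
      intro dz _
      simp [Bool.decide_and]
    · intro dz _ n
      have hiff : (dx ≠ 0 ∨ dy ≠ 0 ∨ dz ≠ 0) ↔ ((dx, dy, dz) ≠ ((0:Int),(0:Int),(0:Int))) := by
        simp [Prod.ext_iff]; tauto
      by_cases hne : (dx, dy, dz) ≠ ((0:Int),(0:Int),(0:Int)) <;>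
        by_cases hm : (x.1 + dx, x.2.1 + dy, x.2.2 + dz) ∈ a <;>
          simp [hiff, hne, hm, addc]
  have hy : ∀ dx : Int, ∀ n : Int,
      ([-1, 0, 1] : List Int).foldl (fun n dy =>
        ([-1, 0, 1] : List Int).foldl (fun n dz =>
          if dx ≠ 0 ∨ dy ≠ 0 ∨ dz ≠ 0 then
            if (x.1 + dx, x.2.1 + dy, x.2.2 + dz) ∈ a then n + 1 else n
          else n) n) n
      = n + (([-1, 0, 1] : List Int).map (fun dy =>
          (([-1, 0, 1] : List Int).countP
            (fun dz => decide (addc x (dx, dy, dz) ∈ a) && decide ((dx, dy, dz) ≠ ((0:Int),(0:Int),(0:Int)))) : Int))).sum := by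
    intro dx n
    rw [PySem.List.foldl_congr_mem' (h := fun dy _ n => hz dx dy n)]
    exact PySem.List.foldl_add _ _ _
  rw [PySem.List.foldl_congr_mem' (h := fun dx _ n => hy dx n), PySem.List.foldl_add]
  unfold pvOffsets
  simp only [List.countP_filter, countP_flatMap', List.countP_map, Nat.cast_list_sum,
    List.map_map, Function.comp_def, zero_add]

-- ---------- gather/scatter swap ----------

lemma swap_count {b : List (Int × Int × Int)} (hb : b.Nodup) (x : Int × Int × Int) :
    (b.countP (fun c => decide (subc x c ∈ pvOffsets)) : Int) = Ncnt b x := by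
  unfold Ncnt
  congr 1
  rw [List.countP_eq_length_filter, List.countP_eq_length_filter]
  have hperm : (List.filter (fun o => decide (addc x o ∈ b)) pvOffsets).map (addc x) |>.Perm
      (List.filter (fun c => decide (subc x c ∈ pvOffsets)) b) := by
    rw [List.perm_ext_iff_of_nodup]
    · intro y
      simp only [List.mem_map, List.mem_filter, decide_eq_true_eq]
      constructor
      · rintro ⟨o, ⟨ho, hmem⟩, rfl⟩
        refine ⟨hmem, ?_⟩
        have : subc (addc x o) x = o := by simp [addc, subc]
        rw [← neg_mem_pvOffsets, this]; exact ho
      · rintro ⟨hy, hs⟩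
        refine ⟨subc y x, ⟨?_, by rw [addc_subc]; exact hy⟩, addc_subc x y⟩
        rw [← neg_mem_pvOffsets]; exact hs
    · exact (nodup_pvOffsets.filter _).map (fun _ _ h => addc_inj x h)
    · exact hb.filter _
  rw [← hperm.length_eq, List.length_map]

-- ---------- B's step realizes the rule ----------

lemma nodup_nbrL (c : Int × Int × Int) : (nbrL c).Nodup :=
  nodup_pvOffsets.map (fun _ _ h => addc_inj c h)

lemma mem_nbrL (c x : Int × Int × Int) : x ∈ nbrL c ↔ subc x c ∈ pvOffsets := by
  simp only [nbrL, List.mem_map]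
  have hsub : ∀ o : Int × Int × Int, subc (addc c o) c = o := by
    rintro ⟨o1, o2, o3⟩; simp [addc, subc]
  constructor
  · rintro ⟨o, ho, rfl⟩; rwa [hsub o]
  · intro h; exact ⟨subc x c, h, (addc_eq_iff c (subc x c) x).2 rfl⟩

lemma count_flatMap_nbrL (b : List (Int × Int × Int)) (x : Int × Int × Int) :
    (b.flatMap nbrL).count x = b.countP (fun c => decide (subc x c ∈ pvOffsets)) := by
  induction b with
  | nil => simp
  | cons c t ih =>
    rw [List.flatMap_cons, List.count_append, List.countP_cons, ih]
    by_cases h : subc x c ∈ pvOffsets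
    · rw [List.count_eq_one_of_mem (nodup_nbrL c) ((mem_nbrL c x).2 h)]
      simp [h]; omega
    · rw [List.count_eq_zero_of_not_mem (fun hm => h ((mem_nbrL c x).1 hm))]
      simp [h]

lemma counts_eq (b : List (Int × Int × Int)) :
    (b.foldl (fun d c =>
      pvOffsets.foldl (fun d o => d.modify (c.1 + o.1, c.2.1 + o.2.1, c.2.2 + o.2.2) 0 (· + 1)) d)
      PySem.Dict.empty)
    = PySem.Dict.counter (b.flatMap nbrL) := by
  rw [PySem.Dict.counter_eq_foldl]
  simp only [List.flatMap_def, List.foldl_flatten, List.foldl_map, nbrL, addc]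

lemma charB {b : List (Int × Int × Int)} (hb : b.Nodup) :
    (bStep b).Nodup ∧ ∀ x, (x ∈ bStep b ↔ Rule b x) := by
  have hstep : bStep b = (PySem.Set.ofList (b.flatMap nbrL)).filter
      (fun k => ((b.flatMap nbrL).count k : Int) == 3 ||
        (((b.flatMap nbrL).count k : Int) == 2 && b.contains k)) := by
    unfold bStep
    simp only [counts_eq, PySem.Dict.items_counter, List.filter_map, List.map_map]
    simp only [Function.comp_def, List.map_id']
    exact PySem.Set.ofList_eq_self_of_nodup _ ((PySem.Set.nodup_ofList _).filter _)
  refine ⟨hstep ▸ (PySem.Set.nodup_ofList _).filter _, fun x => ?_⟩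
  have hcnt : (((b.flatMap nbrL).count x : Int)) = Ncnt b x := by
    rw [count_flatMap_nbrL]; exact swap_count hb x
  have hpos : (0 < b.countP (fun c => decide (subc x c ∈ pvOffsets))) ↔ 0 < Ncnt b x := by
    rw [← swap_count hb x]; exact_mod_cast Iff.rfl
  rw [hstep, List.mem_filter]
  simp only [beq_iff_eq, Bool.or_eq_true, Bool.and_eq_true, hcnt,
    PySem.Set.mem_ofList, List.mem_flatMap, List.contains_iff_mem, Rule]
  constructor
  · rintro ⟨_, hq⟩; exact hq
  · intro h
    refine ⟨?_, h⟩
    have hn : 0 < Ncnt b x := by rcases h with h | ⟨h, _⟩ <;> omega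
    obtain ⟨c, hcb, hsub⟩ := List.countP_pos_iff.1 (hpos.2 hn)
    exact ⟨c, hcb, (mem_nbrL c x).2 (by simpa using hsub)⟩

-- ---------- A's step realizes the rule ----------

lemma foldl_update {α β : Type} [BEq α] (l : List β) (g : β → List α) (s : PySem.Set α) :
    l.foldl (fun s x => PySem.Set.update s (g x)) s = PySem.Set.update s (l.flatMap g) := by
  induction l generalizing s with
  | nil => simp [PySem.Set.update]
  | cons h t ih => rw [List.foldl_cons, ih, List.flatMap_cons, PySem.Set.update_append]

lemma aCheckSet_eq (a : List (Int × Int × Int)) :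
    aCheckSet a = PySem.Set.ofList (a.flatMap fun c => c :: offsets27.map (addc c)) := by
  unfold aCheckSet
  rw [show (fun (s : PySem.Set (Int × Int × Int)) c =>
      let s := PySem.Set.add s c
      (PySem.List.pyRange (-1) 2 1).foldl (fun s dx =>
        (PySem.List.pyRange (-1) 2 1).foldl (fun s dy =>
          (PySem.List.pyRange (-1) 2 1).foldl (fun s dz =>
            PySem.Set.add s (c.1 + dx, c.2.1 + dy, c.2.2 + dz)) s) s) s)
    = fun s c => PySem.Set.update s (c :: offsets27.map (addc c)) from ?_]
  · rw [foldl_update]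
    exact PySem.Set.update_empty _
  · funext s c
    rw [PySem.Set.update_cons]
    simp only [pyRange_m1, ← PySem.Set.update_map_eq_foldl_add]
    have hdy : ∀ (dx : Int) (s' : PySem.Set (Int × Int × Int)),
        ([-1, 0, 1] : List Int).foldl (fun s dy =>
          PySem.Set.update s (([-1, 0, 1] : List Int).map fun dz => (c.1 + dx, c.2.1 + dy, c.2.2 + dz))) s'
        = PySem.Set.update s' (([-1, 0, 1] : List Int).flatMap fun dy =>
            ([-1, 0, 1] : List Int).map fun dz => (c.1 + dx, c.2.1 + dy, c.2.2 + dz)) :=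
      fun dx s' => foldl_update _ _ _
    rw [PySem.List.foldl_congr_mem' (h := fun dx _ s' => hdy dx s'), foldl_update]
    congr 1

lemma mem_aCheckSet (a : List (Int × Int × Int)) (x : Int × Int × Int) :
    x ∈ aCheckSet a ↔ ∃ c ∈ a, subc x c ∈ offsets27 := by
  rw [aCheckSet_eq]
  simp only [PySem.Set.mem_ofList, List.mem_flatMap, List.mem_cons, List.mem_map]
  constructor
  · rintro ⟨c, hc, h | ⟨o, ho, rfl⟩⟩
    · subst h
      exact ⟨x, hc, by rw [mem_offsets27]; norm_num [subc]⟩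
    · exact ⟨c, hc, by rw [subc_addc]; exact ho⟩
  · rintro ⟨c, hc, h⟩
    refine ⟨c, hc, Or.inr ⟨subc x c, h, ?_⟩⟩
    obtain ⟨x1, x2, x3⟩ := x; obtain ⟨c1, c2, c3⟩ := c
    simp [addc, subc]

lemma nodup_aCheckSet (a : List (Int × Int × Int)) : (aCheckSet a).Nodup := by
  rw [aCheckSet_eq]; exact PySem.Set.nodup_ofList _

-- the loop body of A's second pass, written without let-bindings (definitionally equal)
def sF1 (a s : List (Int × Int × Int)) (c : Int × Int × Int) : List (Int × Int × Int) :=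
  if c ∈ a ∧ (aNumActive a c = 2 ∨ aNumActive a c = 3) then PySem.Set.add s c else s
def sF2 (a s : List (Int × Int × Int)) (c : Int × Int × Int) : List (Int × Int × Int) :=
  if c ∈ a ∧ ¬(aNumActive a c = 2 ∨ aNumActive a c = 3) then PySem.Set.discard (sF1 a s c) c
  else sF1 a s c
def stepF (a s : List (Int × Int × Int)) (c : Int × Int × Int) : List (Int × Int × Int) :=
  if c ∉ a ∧ aNumActive a c = 3 then PySem.Set.add (sF2 a s c) c else sF2 a s c

lemma stepF_nodup (a : List (Int × Int × Int)) (s : List (Int × Int × Int)) (hs : s.Nodup)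
    (c : Int × Int × Int) : (stepF a s c).Nodup := by
  unfold stepF sF2 sF1
  split_ifs <;>
    (try exact hs) <;>
    (repeat' first | apply PySem.Set.nodup_add | apply PySem.Set.nodup_discard) <;>
    exact hs

lemma stepF_mem (a : List (Int × Int × Int)) (s : List (Int × Int × Int)) (c : Int × Int × Int)
    (hc : c ∈ s ↔ c ∈ a) (y : Int × Int × Int) :
    y ∈ stepF a s c ↔ (if y = c then Rule a c else y ∈ s) := by
  unfold stepF sF2 sF1
  rw [aNumActive_eq]
  by_cases hca : c ∈ a <;> by_cases h2 : Ncnt a c = 2 <;> by_cases h3 : Ncnt a c = 3 <;>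
    by_cases hyc : y = c <;>
      simp [hca, h2, h3, hyc, Rule, PySem.Set.mem_discard, hc]

lemma aStep_eq (a : List (Int × Int × Int)) : aStep a = (aCheckSet a).foldl (stepF a) a := rfl

lemma aFold (a : List (Int × Int × Int)) : ∀ (todo s : List (Int × Int × Int)), s.Nodup →
    todo.Nodup → (∀ y ∈ todo, (y ∈ s ↔ y ∈ a)) →
    (todo.foldl (stepF a) s).Nodup ∧
      ∀ y, (y ∈ todo.foldl (stepF a) s ↔ if y ∈ todo then Rule a y else y ∈ s) := by
  intro todo
  induction todo with
  | nil => intro s hs _ _; exact ⟨hs, fun y => by simp⟩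
  | cons c t ih =>
    intro s hs ht hmem
    rw [List.foldl_cons]
    have hc : c ∈ s ↔ c ∈ a := hmem c List.mem_cons_self
    have hs' : (stepF a s c).Nodup := stepF_nodup a s hs c
    have hmem' : ∀ y ∈ t, (y ∈ stepF a s c ↔ y ∈ a) := by
      intro y hy
      have hyc : y ≠ c := fun h => (List.nodup_cons.1 ht).1 (h ▸ hy)
      rw [stepF_mem a s c hc y, if_neg hyc]
      exact hmem y (List.mem_cons_of_mem c hy)
    obtain ⟨hnd, hm⟩ := ih (stepF a s c) hs' (List.nodup_cons.1 ht).2 hmem'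
    refine ⟨hnd, fun y => ?_⟩
    rw [hm y]
    by_cases hyt : y ∈ t
    · simp [hyt, List.mem_cons_of_mem c hyt]
    · by_cases hyc : y = c
      · rw [if_neg hyt, stepF_mem a s c hc y, if_pos hyc, hyc, if_pos (by simp)]
      · rw [if_neg hyt, stepF_mem a s c hc y, if_neg hyc,
          if_neg (by simp [hyc, hyt])]

lemma subc_self_mem27 (x : Int × Int × Int) : subc x x ∈ offsets27 := by
  rw [mem_offsets27]; norm_num [subc]

lemma charA {a : List (Int × Int × Int)} (ha : a.Nodup) :
    (aStep a).Nodup ∧ ∀ x, (x ∈ aStep a ↔ Rule a x) := by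
  rw [aStep_eq]
  obtain ⟨hnd, hm⟩ := aFold a (aCheckSet a) a ha (nodup_aCheckSet a) (fun y _ => Iff.rfl)
  refine ⟨hnd, fun x => ?_⟩
  rw [hm x]
  by_cases hx : x ∈ aCheckSet a
  · rw [if_pos hx]
  · rw [if_neg hx]
    have hxa : x ∉ a := fun h => hx ((mem_aCheckSet a x).2 ⟨x, h, subc_self_mem27 x⟩)
    constructor
    · intro h; exact absurd h hxa
    · intro h
      exfalso
      have hpos : 0 < Ncnt a x := by rcases h with h | ⟨h, _⟩ <;> omega
      obtain ⟨o, ho, hmem⟩ := ncnt_pos_witness hpos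
      refine hx ((mem_aCheckSet a x).2 ⟨addc x o, hmem, ?_⟩)
      rw [mem_offsets27]
      have hb := (mem_pvOffsets o).1 ho
      obtain ⟨x1, x2, x3⟩ := x; obtain ⟨o1, o2, o3⟩ := o
      simp only [subc, addc] at *
      omega

-- ---------- the cycle loop preserves the agreement invariant ----------

lemma iter_inv (r : List Int) :
    ∀ a b : List (Int × Int × Int), a.Nodup → b.Nodup → (∀ y, y ∈ a ↔ y ∈ b) →
      (r.foldl (fun s _ => aStep s) a).Nodup ∧
      (r.foldl (fun s _ => bStep s) b).Nodup ∧
      ∀ y, (y ∈ r.foldl (fun s _ => aStep s) a ↔ y ∈ r.foldl (fun s _ => bStep s) b) := by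
  induction r with
  | nil => intro a b ha hb hm; exact ⟨ha, hb, hm⟩
  | cons hd tl ih =>
    intro a b ha hb hm
    simp only [List.foldl_cons]
    obtain ⟨hna, hmA⟩ := charA ha
    obtain ⟨hnb, hmB⟩ := charB hb
    exact ih (aStep a) (bStep b) hna hnb
      (fun y => by rw [hmA y, hmB y]; exact rule_congr hm y)

-- ===== VERDICT (by name: the statement is the Claim_ definition above) =====
theorem countActiveCubesAfterXCycles_spec : Claim_equal_countActiveCubesAfterXCycles := by
  intro activeSet cycles _ hpre
  unfold Spec_countActiveCubesAfterXCycles countActiveCubesAfterXCycles countActiveCubesAfterXCycles_alt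
  obtain ⟨hna, hnb, hm⟩ := iter_inv (PySem.List.pyRange 0 cycles 1) activeSet activeSet hpre hpre (fun y => Iff.rfl)
  have hperm := (List.perm_ext_iff_of_nodup hna hnb).2 hm
  exact congrArg Int.ofNat hperm.length_eq
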